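-- pv_equiv track=rewrite | github.com/thealper2/codewars-solutions | 7-kyu/shared_bit_counter.py | shared_bits
-- ===== SOURCE A (Python) =====
-- def shared_bits(a, b):
--     count = 0
--     while a > 0 and b > 0:
--         d_a = a % 2
--         a //= 2
--
--         d_b = b % 2
--         b //= 2
--
--         if d_a == 1 and d_b == 1:
--             count += 1
--
--     return count >= 2
-- ===== SOURCE B (Python) =====
-- def shared_bits(a, b):
--     return a > 0 and b > 0 and bin(a & b).count('1') >= 2
-- ===== Notes on version B (the rewrite author's own statement) =====
-- stated objective: simpler
-- what changed: Replaces the bit-by-bit halving loop with a single closed-form popcount of a & b (guarded by a > 0 and b > 0, which is where A's loop runs at all).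
import Mathlib
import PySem

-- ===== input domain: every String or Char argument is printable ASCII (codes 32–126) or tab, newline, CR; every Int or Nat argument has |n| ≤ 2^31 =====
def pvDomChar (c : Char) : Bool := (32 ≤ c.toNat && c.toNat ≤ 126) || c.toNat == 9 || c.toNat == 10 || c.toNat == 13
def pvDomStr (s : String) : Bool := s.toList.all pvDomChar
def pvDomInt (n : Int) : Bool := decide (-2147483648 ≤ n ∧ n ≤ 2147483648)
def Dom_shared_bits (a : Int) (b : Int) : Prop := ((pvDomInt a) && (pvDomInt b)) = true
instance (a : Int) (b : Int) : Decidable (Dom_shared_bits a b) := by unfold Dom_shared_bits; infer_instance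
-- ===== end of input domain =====

-- B replaces A's bit-by-bit halving loop by one closed-form popcount of a & b; objective: simpler.

-- ===== PORT A =====
-- the while-loop of A as a recursion over (a, b, count)
def sbLoop (a : Int) (b : Int) (count : Int) : Int :=
  if h : 0 < a ∧ 0 < b then
    sbLoop (PySem.Int.floordiv a 2) (PySem.Int.floordiv b 2)
      (if PySem.Int.mod a 2 = 1 ∧ PySem.Int.mod b 2 = 1 then count + 1 else count)
  else count
termination_by a.toNat
decreasing_by
  rw [PySem.Int.floordiv_eq_ediv_of_pos (by norm_num)]
  omega

def shared_bits (a : Int) (b : Int) : Bool := decide (2 ≤ sbLoop a b 0)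

-- ===== PORT B =====
-- Source B: return a > 0 and b > 0 and bin(a & b).count('1') >= 2
-- (bin(x).count('1') on x = a & b with a, b > 0 is the population count = PySem.Int.bitCount)
def shared_bits_alt (a : Int) (b : Int) : Bool :=
  decide (0 < a) && decide (0 < b) && decide (2 ≤ PySem.Int.bitCount (PySem.Int.band a b))

-- ===== PRECONDITION & SPEC =====
def Spec_shared_bits (a : Int) (b : Int) (out : Bool) : Prop := out = shared_bits_alt a b
instance (a : Int) (b : Int) (out : Bool) : Decidable (Spec_shared_bits a b out) := by unfold Spec_shared_bits; infer_instance

-- ===== CLAIM (what is proved, stated in full; the proofs are below) =====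
def Claim_equal_shared_bits : Prop := ∀ (a : Int) (b : Int), Dom_shared_bits a b → Spec_shared_bits a b (shared_bits a b)

-- ===== LEMMAS AND PROOFS =====

theorem land_div_two (m n : Nat) : (m &&& n) / 2 = (m / 2) &&& (n / 2) := by
  conv_lhs => rw [← Nat.bit_testBit_zero_shiftRight_one m, ← Nat.bit_testBit_zero_shiftRight_one n]
  rw [Nat.land_bit, Nat.bit_div_two, Nat.shiftRight_one, Nat.shiftRight_one]

theorem land_mod_two (m n : Nat) : (m &&& n) % 2 = (m % 2) * (n % 2) := by
  conv_lhs => rw [← Nat.bit_testBit_zero_shiftRight_one m, ← Nat.bit_testBit_zero_shiftRight_one n]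
  rw [Nat.land_bit, Nat.bit_mod_two]
  simp only [Nat.testBit_zero]
  rcases Nat.mod_two_eq_zero_or_one m with hm | hm <;>
    rcases Nat.mod_two_eq_zero_or_one n with hn | hn <;> simp [hm, hn]

-- bitCount (↑k) step valid also at k = 0
theorem bitCount_step (k : Nat) :
    PySem.Int.bitCount ((k : Nat) : Int) = k % 2 + PySem.Int.bitCount ((k / 2 : Nat) : Int) := by
  rcases Nat.eq_zero_or_pos k with hk | hk
  · subst hk; simp [PySem.Int.bitCount_zero]
  · exact PySem.Int.bitCount_natCast hk

theorem sbLoop_eq (m : Nat) : ∀ (n : Nat) (c : Int),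
    sbLoop (m : Int) (n : Int) c = c + ((PySem.Int.bitCount (((m &&& n : Nat) : Int))) : Int) := by
  induction m using Nat.strong_induction_on with
  | _ m ih =>
    intro n c
    rcases Nat.eq_zero_or_pos m with hm | hm
    · subst hm
      rw [sbLoop]
      simp
    · rcases Nat.eq_zero_or_pos n with hn | hn
      · subst hn
        rw [sbLoop]
        simp
      · rw [sbLoop]
        rw [dif_pos ⟨by exact_mod_cast hm, by exact_mod_cast hn⟩]
        have hfm : PySem.Int.floordiv (m : Int) 2 = ((m / 2 : Nat) : Int) := by
          exact_mod_cast PySem.Int.floordiv_natCast m 2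
        have hfn : PySem.Int.floordiv (n : Int) 2 = ((n / 2 : Nat) : Int) := by
          exact_mod_cast PySem.Int.floordiv_natCast n 2
        have hmm : PySem.Int.mod (m : Int) 2 = ((m % 2 : Nat) : Int) := by
          exact_mod_cast PySem.Int.mod_natCast m 2
        have hmn : PySem.Int.mod (n : Int) 2 = ((n % 2 : Nat) : Int) := by
          exact_mod_cast PySem.Int.mod_natCast n 2
        rw [hfm, hfn, hmm, hmn, ih (m / 2) (by omega) (n / 2)]
        rw [bitCount_step (m &&& n), land_div_two]
        have hlm := land_mod_two m n
        rcases Nat.mod_two_eq_zero_or_one m with h1 | h1 <;>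
          rcases Nat.mod_two_eq_zero_or_one n with h2 | h2 <;>
          simp [h1, h2, h1 ▸ h2 ▸ hlm] <;> omega

theorem shared_bits_eq_alt (a b : Int) : shared_bits a b = shared_bits_alt a b := by
  by_cases h : 0 < a ∧ 0 < b
  · obtain ⟨ha, hb⟩ := h
    have hma : a = ((a.toNat : Nat) : Int) := by omega
    have hmb : b = ((b.toNat : Nat) : Int) := by omega
    rw [shared_bits, shared_bits_alt, hma, hmb,
      PySem.Int.band_of_nonneg (by omega) (by omega), sbLoop_eq]
    have h2 : (0:Int) < ((a.toNat : Nat) : Int) := by omega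
    have h3 : (0:Int) < ((b.toNat : Nat) : Int) := by omega
    simp only [zero_add, h2, h3, decide_true, Bool.true_and]
    have : ((2:Int) ≤ ((PySem.Int.bitCount ((a.toNat &&& b.toNat : Nat) : Int) : Nat) : Int)) ↔
        (2 ≤ PySem.Int.bitCount ((a.toNat &&& b.toNat : Nat) : Int)) := by exact_mod_cast Iff.rfl
    simp only [this, Int.toNat_natCast]
    rfl
  · rw [shared_bits, shared_bits_alt, sbLoop]
    rw [dif_neg h]
    have : ¬ (0 < a) ∨ ¬ (0 < b) := by tauto
    rcases this with h1 | h1 <;> simp [h1]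

-- ===== VERDICT (by name: the statement is the Claim_ definition above) =====
theorem shared_bits_spec : Claim_equal_shared_bits := by
  intro a b _
  exact shared_bits_eq_alt a b
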